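-- pv_equiv track=rewrite | github.com/alexjst/algorithms | Python/companies/Faire/03_funnel_problem_solution.py | compute_funnel_counts
-- ===== SOURCE A (Python) =====
-- from typing import List, Dict, Tuple
-- from collections import defaultdict
--
-- def compute_funnel_counts(funnels: List[str], events: List[str]) -> List[str]:
--     """
--     More verbose implementation with detailed comments.
--     """
--     # Step 1: Parse funnel definitions
--     funnel_definitions = []
--     for funnel_csv in funnels:
--         parts = funnel_csv.split(',')
--         name = parts[0]
--         steps = parts[1:]
--         funnel_definitions.append({
--             'name': name,
--             'steps': steps
--         })
--
--     # Step 2: Parse user events and organize by user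
--     events_by_user = defaultdict(list)
--     for event_csv in events:
--         parts = event_csv.split(',')
--         user_id = int(parts[0])
--         timestamp = int(parts[1])
--         event_name = parts[2]
--
--         events_by_user[user_id].append({
--             'timestamp': timestamp,
--             'event_name': event_name
--         })
--
--     # Step 3: Events already sorted by timestamp (guaranteed by problem)
--
--     # Step 4: Process each funnel
--     output_lines = []
--
--     for funnel_def in funnel_definitions:
--         funnel_name = funnel_def['name']
--         funnel_steps = funnel_def['steps']
--         num_steps = len(funnel_steps)
--
--         # Track users who reached each step
--         users_at_step = [set() for _ in range(num_steps)]
--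
--         # Step 5: Simulate each user's journey through this funnel
--         for user_id, user_event_list in events_by_user.items():
--             # User's current position in the funnel (step index)
--             position = 0  # Starts before first step
--
--             # Process user's events in chronological order
--             for event in user_event_list:
--                 event_name = event['event_name']
--
--                 # Check if this event advances the user in the funnel
--                 if position < num_steps and event_name == funnel_steps[position]:
--                     # User reached this step
--                     users_at_step[position].add(user_id)
--                     position += 1
--
--                     # Early termination if user completed entire funnel
--                     if position >= num_steps:
--                         break
--
--         # Step 6: Format output for this funnel
--         output_parts = [funnel_name]
--         for step_idx, step_name in enumerate(funnel_steps):
--             user_count = len(users_at_step[step_idx])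
--             output_parts.append(f"{step_name}({user_count})")
--
--         output_line = ','.join(output_parts)
--         output_lines.append(output_line)
--
--     return output_lines
-- ===== SOURCE B (Python) =====
-- def compute_funnel_counts(funnels, events):
--     # Single sweep over the events per funnel, keeping a per-user position map
--     # instead of grouping events by user and maintaining per-step sets.
--     funnel_defs = []
--     for funnel_csv in funnels:
--         parts = funnel_csv.split(',')
--         funnel_defs.append((parts[0], parts[1:]))
--
--     parsed = []
--     for event_csv in events:
--         parts = event_csv.split(',')
--         user_id = int(parts[0])
--         int(parts[1])  # timestamp: validated but unused (events arrive sorted)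
--         parsed.append((user_id, parts[2]))
--
--     output_lines = []
--     for name, steps in funnel_defs:
--         n = len(steps)
--         pos = {}
--         counts = [0] * n
--         for user, event_name in parsed:
--             p = pos.get(user, 0)
--             if p < n and event_name == steps[p]:
--                 counts[p] += 1
--                 pos[user] = p + 1
--         output_lines.append(','.join([name] + [f"{s}({c})" for s, c in zip(steps, counts)]))
--     return output_lines
-- ===== Notes on version B (the rewrite author's own statement) =====
-- stated objective: alternative
-- what changed: Replaces A's grouping of events by user plus per-step user sets (simulating each user's journey separately per funnel) with a single in-order sweep of the parsed event list per funnel that maintains a per-user position map and an integer counts list.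
import Mathlib
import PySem

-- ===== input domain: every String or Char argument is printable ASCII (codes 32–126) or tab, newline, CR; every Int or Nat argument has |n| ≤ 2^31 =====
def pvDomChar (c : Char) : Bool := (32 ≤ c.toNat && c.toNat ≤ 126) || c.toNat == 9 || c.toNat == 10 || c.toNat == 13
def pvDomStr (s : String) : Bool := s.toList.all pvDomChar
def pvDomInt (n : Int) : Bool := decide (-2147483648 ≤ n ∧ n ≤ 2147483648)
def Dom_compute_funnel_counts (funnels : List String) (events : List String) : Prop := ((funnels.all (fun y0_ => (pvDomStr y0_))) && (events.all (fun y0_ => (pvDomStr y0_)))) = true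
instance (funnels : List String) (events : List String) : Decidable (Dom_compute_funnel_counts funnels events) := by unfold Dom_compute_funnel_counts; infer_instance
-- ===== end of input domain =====

-- B replaces A's group-events-by-user pass plus per-step user sets by a single in-order
-- sweep of the events per funnel that maintains a per-user position map and a counts list
-- (objective: alternative — same asymptotic cost, a different algorithm/data structure).

-- ===== PORT A =====

-- Step 1 of A: parse funnel definitions (name, steps)
def pvFunnelDefsA (funnels : List String) : List (String × List String) :=
  funnels.foldl (fun acc funnel_csv =>
    let parts := (PySem.Str.split? funnel_csv ",").getD []
    acc ++ [(PySem.List.pyGetD parts 0 "", PySem.List.slice parts (some 1) none)]) []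

-- Step 2 of A: parse user events and group them by user (defaultdict(list) append)
def pvGroupA (events : List String) : PySem.Dict Int (List (Int × String)) :=
  events.foldl (fun d event_csv =>
    let parts := (PySem.Str.split? event_csv ",").getD []
    let user_id := (PySem.Int.ofStr? (PySem.List.pyGetD parts 0 "")).getD 0
    let timestamp := (PySem.Int.ofStr? (PySem.List.pyGetD parts 1 "")).getD 0
    let event_name := PySem.List.pyGetD parts 2 ""
    d.modify user_id [] (· ++ [(timestamp, event_name)])) PySem.Dict.empty

-- Step 5 of A: one user's journey through a funnel (with the early break on completion)
def pvSimA (steps : List String) (n : Nat) (uid : Int) :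
    List (Int × String) → Nat → List (PySem.Set Int) → List (PySem.Set Int)
  | [], _, sets => sets
  | ev :: rest, pos, sets =>
    if pos < n ∧ ev.2 = steps.getD pos "" then
      let sets' := sets.set pos (PySem.Set.add (sets.getD pos PySem.Set.empty) uid)
      if n ≤ pos + 1 then sets'
      else pvSimA steps n uid rest (pos + 1) sets'
    else pvSimA steps n uid rest pos sets

def compute_funnel_counts (funnels : List String) (events : List String) : List String :=
  let funnel_definitions := pvFunnelDefsA funnels
  let events_by_user := pvGroupA events
  funnel_definitions.foldl (fun output_lines fd =>
    let funnel_steps := fd.2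
    let num_steps := funnel_steps.length
    let users_at_step0 : List (PySem.Set Int) := List.replicate num_steps PySem.Set.empty
    let users_at_step := events_by_user.items.foldl
      (fun sets p => pvSimA funnel_steps num_steps p.1 p.2 0 sets) users_at_step0
    let output_parts := (PySem.List.enumerate funnel_steps).foldl
      (fun ps q => ps ++ [q.2 ++ "(" ++
        PySem.Int.toStr (PySem.Set.len (PySem.List.pyGetD users_at_step q.1 PySem.Set.empty)) ++ ")"])
      [fd.1]
    output_lines ++ [PySem.Str.join "," output_parts]) []

-- ===== PORT B =====

def pvFunnelDefsB (funnels : List String) : List (String × List String) :=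
  funnels.map (fun funnel_csv =>
    let parts := (PySem.Str.split? funnel_csv ",").getD []
    (PySem.List.pyGetD parts 0 "", PySem.List.slice parts (some 1) none))

def pvParsedB (events : List String) : List (Int × String) :=
  events.map (fun event_csv =>
    let parts := (PySem.Str.split? event_csv ",").getD []
    let user_id := (PySem.Int.ofStr? (PySem.List.pyGetD parts 0 "")).getD 0
    let _timestamp := (PySem.Int.ofStr? (PySem.List.pyGetD parts 1 "")).getD 0
    (user_id, PySem.List.pyGetD parts 2 ""))

-- one sweep step: advance the event's user in the funnel, bump the step counter
def pvSweepB (steps : List String) (n : Nat)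
    (st : PySem.Dict Int Nat × List Int) (pe : Int × String) : PySem.Dict Int Nat × List Int :=
  let p := st.1.getD pe.1 0
  if p < n ∧ pe.2 = steps.getD p "" then
    (st.1.insert pe.1 (p + 1), st.2.set p (st.2.getD p 0 + 1))
  else st

def compute_funnel_counts_alt (funnels : List String) (events : List String) : List String :=
  let parsed := pvParsedB events
  (pvFunnelDefsB funnels).map (fun fd =>
    let steps := fd.2
    let n := steps.length
    let st := parsed.foldl (pvSweepB steps n) (PySem.Dict.empty, List.replicate n (0 : Int))
    PySem.Str.join "," (fd.1 ::
      (steps.zip st.2).map (fun sc => sc.1 ++ "(" ++ PySem.Int.toStr sc.2 ++ ")")))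

-- ===== PRECONDITION & SPEC =====
-- Pre_ excludes exactly the event strings on which Python A raises: fewer than three
-- comma-separated fields (IndexError) or a first/second field that int() rejects (ValueError).
def Pre_compute_funnel_counts (funnels : List String) (events : List String) : Prop :=
  ∀ e ∈ events,
    3 ≤ ((PySem.Str.split? e ",").getD []).length ∧
    (PySem.Int.ofStr? (PySem.List.pyGetD ((PySem.Str.split? e ",").getD []) 0 "")).isSome = true ∧
    (PySem.Int.ofStr? (PySem.List.pyGetD ((PySem.Str.split? e ",").getD []) 1 "")).isSome = true
instance (funnels : List String) (events : List String) : Decidable (Pre_compute_funnel_counts funnels events) := by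
  unfold Pre_compute_funnel_counts; infer_instance

def pvWitness_compute_funnel_counts : List String × List String :=
  (["checkout,view,buy"], ["7,10,view", "7,11,buy", "8,12,view"])

def Spec_compute_funnel_counts (funnels : List String) (events : List String) (out : List String) : Prop := out = compute_funnel_counts_alt funnels events
instance (funnels : List String) (events : List String) (out : List String) : Decidable (Spec_compute_funnel_counts funnels events out) := by unfold Spec_compute_funnel_counts; infer_instance

-- ===== CLAIM (what is proved, stated in full; the proofs are below) =====
def Claim_equal_compute_funnel_counts : Prop := ∀ (funnels : List String) (events : List String), Dom_compute_funnel_counts funnels events → Pre_compute_funnel_counts funnels events → Spec_compute_funnel_counts funnels events (compute_funnel_counts funnels events)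

-- ===== LEMMAS AND PROOFS =====

-- parse of a single event, named for the proofs
def pvParts (e : String) : List String := (PySem.Str.split? e ",").getD []
def pvUid (e : String) : Int := (PySem.Int.ofStr? (PySem.List.pyGetD (pvParts e) 0 "")).getD 0
def pvTs (e : String) : Int := (PySem.Int.ofStr? (PySem.List.pyGetD (pvParts e) 1 "")).getD 0
def pvNm (e : String) : String := PySem.List.pyGetD (pvParts e) 2 ""

-- greedy position of one user after a list of his event names
def pvGreedy (steps : List String) (n : Nat) : List String → Nat → Nat
  | [], p => p
  | nm :: rest, p =>
    if p < n ∧ nm = steps.getD p "" then pvGreedy steps n rest (p + 1)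
    else pvGreedy steps n rest p

def pvNames (u : Int) (P : List (Int × String)) : List String :=
  (P.filter (fun q => q.1 == u)).map (·.2)

lemma pvGetD_set {α : Type} (xs : List α) (m : Nat) (v d : α) (i : Nat) :
    (xs.set m v).getD i d = if i = m ∧ m < xs.length then v else xs.getD i d := by
  simp only [List.getD_eq_getElem?_getD, List.getElem?_set]
  split_ifs with h1 h2 h3 <;> simp_all

lemma pvGreedy_of_ge (steps : List String) (n : Nat) (l : List String) (p : Nat) (h : n ≤ p) :
    pvGreedy steps n l p = p := by
  induction l generalizing p with
  | nil => rfl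
  | cons a t ih => simp only [pvGreedy]; rw [if_neg (by omega)]; exact ih p h

lemma pvGreedy_ge (steps : List String) (n : Nat) (l : List String) (p : Nat) :
    p ≤ pvGreedy steps n l p := by
  induction l generalizing p with
  | nil => exact le_refl _
  | cons a t ih =>
    simp only [pvGreedy]; split_ifs with h
    · exact le_trans (by omega) (ih (p+1))
    · exact ih p

lemma pvGreedy_append (steps : List String) (n : Nat) (l : List String) (x : String) (p : Nat) :
    pvGreedy steps n (l ++ [x]) p =
      (if pvGreedy steps n l p < n ∧ x = steps.getD (pvGreedy steps n l p) "" then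
        pvGreedy steps n l p + 1 else pvGreedy steps n l p) := by
  induction l generalizing p with
  | nil => simp [pvGreedy]
  | cons a t ih =>
    simp only [List.cons_append, pvGreedy]
    by_cases h : p < n ∧ a = steps.getD p ""
    · rw [if_pos h, if_pos h]; exact ih (p + 1)
    · rw [if_neg h, if_neg h]; exact ih p

lemma pvSimA_length (steps : List String) (n : Nat) (uid : Int) (l : List (Int × String))
    (pos : Nat) (sets : List (PySem.Set Int)) :
    (pvSimA steps n uid l pos sets).length = sets.length := by
  induction l generalizing pos sets with
  | nil => rfl
  | cons a t ih =>
    simp only [pvSimA]; split_ifs with h1 h2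
    · simp
    · rw [ih]; simp
    · exact ih pos sets

lemma pvSimA_getD (steps : List String) (n : Nat) (uid : Int) (l : List (Int × String))
    (pos : Nat) (sets : List (PySem.Set Int)) (hn : sets.length = n) (hp : pos ≤ n) (i : Nat) :
    (pvSimA steps n uid l pos sets).getD i PySem.Set.empty =
      if pos ≤ i ∧ i < pvGreedy steps n (l.map (·.2)) pos then
        PySem.Set.add (sets.getD i PySem.Set.empty) uid
      else sets.getD i PySem.Set.empty := by
  induction l generalizing pos sets with
  | nil =>
    simp only [List.map_nil, pvGreedy, pvSimA]
    rw [if_neg (by omega)]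
  | cons a rest ih =>
    simp only [pvSimA, List.map_cons, pvGreedy]
    by_cases hc : pos < n ∧ a.2 = steps.getD pos ""
    · simp only [if_pos hc]
      have hc1 := hc.1
      by_cases hb : n ≤ pos + 1
      · rw [if_pos hb]
        simp only [pvGreedy_of_ge _ _ _ _ (show n ≤ pos + 1 from hb)]
        rw [pvGetD_set]
        split_ifs <;>
          first | rfl | omega | (have hi : i = pos := (by omega); subst hi; rfl)
      · rw [if_neg hb, ih (pos + 1) _ (by simpa using hn) (by omega), pvGetD_set]
        have hg := pvGreedy_ge steps n (rest.map (·.2)) (pos + 1)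
        split_ifs <;>
          first | rfl | omega | (have hi : i = pos := (by omega); subst hi; rfl)
    · simp only [if_neg hc]
      exact ih pos sets hn hp

lemma pvAfold_getD (steps : List String) (n : Nat) (items : List (Int × List (Int × String)))
    (sets : List (PySem.Set Int)) (hn : sets.length = n) (i : Nat) :
    (items.foldl (fun s p => pvSimA steps n p.1 p.2 0 s) sets).getD i PySem.Set.empty =
      items.foldl (fun acc p =>
        if i < pvGreedy steps n (p.2.map (·.2)) 0 then PySem.Set.add acc p.1 else acc)
        (sets.getD i PySem.Set.empty) := by
  induction items generalizing sets with
  | nil => rfl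
  | cons a t ih =>
    simp only [List.foldl_cons]
    rw [ih _ (by rw [pvSimA_length, hn]),
      pvSimA_getD _ _ _ _ _ _ hn (Nat.zero_le n)]
    simp only [Nat.zero_le, true_and]

lemma pvFoldAddFilter {β : Type} (f : Int × β → Prop) [DecidablePred f] :
    ∀ (items : List (Int × β)) (acc : PySem.Set Int),
    (items.map (·.1)).Nodup → (∀ p ∈ items, PySem.Set.contains acc p.1 = false) →
    items.foldl (fun s p => if f p then PySem.Set.add s p.1 else s) acc =
      acc ++ (items.filter (fun p => decide (f p))).map (·.1) := by
  intro items
  induction items with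
  | nil => simp
  | cons a t ih =>
    intro acc hnd hacc
    simp only [List.map_cons, List.nodup_cons] at hnd
    simp only [List.foldl_cons, List.filter_cons]
    by_cases h : f a
    · have hca : a.1 ∉ acc := by
        simpa [PySem.Set.contains] using hacc a (List.mem_cons_self)
      have hadd : PySem.Set.add acc a.1 = acc ++ [a.1] := by
        simp [PySem.Set.add, PySem.Set.contains, hca]
      rw [if_pos h, hadd, if_pos (by simpa using h),
        ih (acc ++ [a.1]) hnd.2 ?side]
      · simp
      case side =>
        intro p hp
        have h1 : p.1 ∉ acc := by
          simpa [PySem.Set.contains] using hacc p (List.mem_cons_of_mem _ hp)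
        have h2 : p.1 ≠ a.1 := by
          intro hcontra
          exact hnd.1 (hcontra ▸ List.mem_map_of_mem hp)
        simp [PySem.Set.contains, List.mem_append, h1, h2]
    · rw [if_neg h, if_neg (by simpa using h)]
      exact ih acc hnd.2 (fun p hp => hacc p (List.mem_cons_of_mem _ hp))

lemma pvDedup_append_singleton (l : List Int) (x : Int) :
    PySem.List.dedup (l ++ [x]) =
      if x ∈ l then PySem.List.dedup l else PySem.List.dedup l ++ [x] := by
  simp only [PySem.List.dedup_eq_ofList, PySem.Set.ofList_eq_foldl, List.foldl_append,
    List.foldl_cons, List.foldl_nil]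
  have : (List.foldl PySem.Set.add [] l).add x =
      if x ∈ List.foldl PySem.Set.add [] l then List.foldl PySem.Set.add [] l
      else List.foldl PySem.Set.add [] l ++ [x] := by
    simp [PySem.Set.add, PySem.Set.contains]
  rw [this]
  have hmem : x ∈ List.foldl PySem.Set.add [] l ↔ x ∈ l := by
    rw [← PySem.Set.ofList_eq_foldl]
    exact PySem.Set.mem_ofList l x
  split_ifs with h1 h2 h3 <;> first | rfl | (exact absurd (hmem.mp h1) h2) | (exact absurd (hmem.mpr h3) h1)

lemma pvNames_append_self (u : Int) (P : List (Int × String)) (nm : String) :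
    pvNames u (P ++ [(u, nm)]) = pvNames u P ++ [nm] := by
  simp [pvNames, List.filter_append]

lemma pvNames_append_ne (u v : Int) (P : List (Int × String)) (nm : String) (h : v ≠ u) :
    pvNames v (P ++ [(u, nm)]) = pvNames v P := by
  have hb : (u == v) = false := beq_eq_false_iff_ne.mpr (Ne.symm h)
  simp [pvNames, List.filter_append, hb]

lemma pvNames_of_not_mem (u : Int) (P : List (Int × String)) (h : u ∉ P.map (·.1)) :
    pvNames u P = [] := by
  simp only [pvNames, List.map_eq_nil_iff, List.filter_eq_nil_iff]
  intro q hq hqu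
  have hq1 : q.1 = u := by simpa using hqu
  exact h (hq1 ▸ List.mem_map_of_mem hq)

lemma pvCountP_update (l : List Int) (u : Int) (f g : Int → Bool) (hnd : l.Nodup) (hu : u ∈ l)
    (hfg : ∀ v ∈ l, v ≠ u → f v = g v) :
    l.countP g + (if f u = true then 1 else 0) = l.countP f + (if g u = true then 1 else 0) := by
  obtain ⟨l1, l2, rfl⟩ := List.append_of_mem hu
  have h1 : u ∉ l1 ∧ u ∉ l2 := by
    simp only [List.nodup_append, List.nodup_cons] at hnd
    refine ⟨?_, hnd.2.1.1⟩
    intro hx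
    have hd := hnd.2.2
    simp at hd
    exact (hd u hx).1 rfl
  have e1 : l1.countP f = l1.countP g :=
    List.countP_congr (fun v hv => by
      rw [hfg v (List.mem_append_left _ hv) (fun e => h1.1 (e ▸ hv))])
  have e2 : l2.countP f = l2.countP g :=
    List.countP_congr (fun v hv => by
      rw [hfg v (by simp [hv]) (fun e => h1.2 (e ▸ hv))])
  simp only [List.countP_append, List.countP_cons]
  omega

lemma pvGetD_replicate {α : Type} (n i : Nat) (a : α) : (List.replicate n a).getD i a = a := by
  simp only [List.getD_eq_getElem?_getD, List.getElem?_replicate]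
  split_ifs <;> rfl

-- the sweep invariant of B
lemma pvSweep_inv (steps : List String) (n : Nat) (P : List (Int × String)) :
    (∀ u, (P.foldl (pvSweepB steps n) (PySem.Dict.empty, List.replicate n (0 : Int))).1.getD u 0 =
        pvGreedy steps n (pvNames u P) 0) ∧
    (P.foldl (pvSweepB steps n) (PySem.Dict.empty, List.replicate n (0 : Int))).2.length = n ∧
    (∀ i : Nat, (P.foldl (pvSweepB steps n) (PySem.Dict.empty, List.replicate n (0 : Int))).2.getD i 0 =
      ((PySem.List.dedup (P.map (·.1))).countP
        (fun u => decide (i < pvGreedy steps n (pvNames u P) 0)) : Int)) := by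
  induction P using List.reverseRecOn with
  | nil =>
    refine ⟨fun u => ?_, by simp, fun i => ?_⟩
    · simp [pvNames, pvGreedy, PySem.Dict.getD_empty]
    · simp [pvNames, PySem.List.dedup_eq_ofList]
  | append_singleton P e ih =>
    obtain ⟨eu, en⟩ := e
    obtain ⟨iha, ihb, ihc⟩ := ih
    simp only [List.foldl_append, List.foldl_cons, List.foldl_nil] at *
    simp only [pvSweepB, iha]
    by_cases hcc : pvGreedy steps n (pvNames eu P) 0 < n ∧
        en = steps.getD (pvGreedy steps n (pvNames eu P) 0) ""
    · simp only [if_pos hcc]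
      refine ⟨fun u => ?_, by simp [ihb], fun i => ?_⟩
      · rw [PySem.Dict.getD_insert]
        by_cases hu : u = eu
        · subst hu
          rw [if_pos rfl, pvNames_append_self, pvGreedy_append, if_pos hcc]
        · rw [if_neg hu, pvNames_append_ne _ _ _ _ hu, iha]
      · rw [pvGetD_set]
        simp only [List.map_append, List.map_cons, List.map_nil]
        rw [pvDedup_append_singleton]
        have hq1 : pvGreedy steps n (pvNames eu P) 0 < (P.foldl (pvSweepB steps n)
            (PySem.Dict.empty, List.replicate n (0 : Int))).2.length := by
          rw [ihb]; exact hcc.1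
        by_cases he : eu ∈ P.map (·.1)
        · rw [if_pos he]
          have hcp := pvCountP_update (PySem.List.dedup (P.map (·.1))) eu
            (fun u => decide (i < pvGreedy steps n (pvNames u P) 0))
            (fun u => decide (i < pvGreedy steps n (pvNames u (P ++ [(eu, en)])) 0))
            (by rw [PySem.List.dedup_eq_ofList]; exact PySem.Set.nodup_ofList _)
            (by rw [PySem.List.dedup_eq_ofList]; exact (PySem.Set.mem_ofList _ _).mpr he)
            (fun v hv hvne => by simp only [pvNames_append_ne _ _ _ _ hvne])
          simp only [pvNames_append_self, pvGreedy_append, if_pos hcc] at hcp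
          by_cases hip : i = pvGreedy steps n (pvNames eu P) 0
          · subst hip
            rw [if_pos ⟨rfl, hq1⟩, ihc]
            simp at hcp
            simp only [PySem.List.dedup_eq_ofList]
            omega
          · rw [if_neg (fun hx => hip hx.1), ihc i]
            by_cases hd : i < pvGreedy steps n (pvNames eu P) 0
            · simp [hd, Nat.lt_succ_of_lt hd] at hcp
              simp only [PySem.List.dedup_eq_ofList]
              omega
            · simp [hd, show ¬ i < pvGreedy steps n (pvNames eu P) 0 + 1 by omega] at hcp
              simp only [PySem.List.dedup_eq_ofList]
              omega
        · rw [if_neg he]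
          have hp0 : pvGreedy steps n (pvNames eu P) 0 = 0 := by
            rw [pvNames_of_not_mem _ _ he]; rfl
          rw [List.countP_append, List.countP_cons, List.countP_nil]
          have hgu : decide (i < pvGreedy steps n (pvNames eu (P ++ [(eu, en)])) 0)
              = decide (i < 1) := by
            rw [pvNames_append_self, pvGreedy_append, if_pos hcc, hp0]
          have hrest : (PySem.List.dedup (P.map (·.1))).countP
              (fun u => decide (i < pvGreedy steps n (pvNames u (P ++ [(eu, en)])) 0)) =
              (PySem.List.dedup (P.map (·.1))).countP
              (fun u => decide (i < pvGreedy steps n (pvNames u P) 0)) := by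
            refine List.countP_congr (fun v hv => ?_)
            have hvne : v ≠ eu := by
              intro hx
              rw [PySem.List.dedup_eq_ofList] at hv
              exact he (hx ▸ (PySem.Set.mem_ofList _ _).mp hv)
            rw [pvNames_append_ne _ _ _ _ hvne]
          rw [ihc i, hrest, hgu, hp0]
          by_cases hi0 : i = 0
          · subst hi0
            rw [if_pos ⟨rfl, hp0 ▸ hq1⟩, ihc 0]
            simp [PySem.List.dedup_eq_ofList]
          · rw [if_neg (fun hx => hi0 hx.1)]
            simp [show ¬ i < 1 by omega]
    · simp only [if_neg hcc]
      refine ⟨fun u => ?_, ihb, fun i => ?_⟩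
      · by_cases hu : u = eu
        · subst hu
          rw [pvNames_append_self, pvGreedy_append, if_neg hcc]
          exact iha u
        · rw [pvNames_append_ne _ _ _ _ hu]
          exact iha u
      · rw [ihc i]
        simp only [List.map_append, List.map_cons, List.map_nil]
        rw [pvDedup_append_singleton]
        by_cases he : eu ∈ P.map (·.1)
        · rw [if_pos he]
          refine congrArg _ (List.countP_congr (fun v hv => ?_)).symm
          by_cases hvne : v = eu
          · subst hvne
            rw [pvNames_append_self, pvGreedy_append, if_neg hcc]
          · rw [pvNames_append_ne _ _ _ _ hvne]
        · rw [if_neg he]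
          have hp0 : pvGreedy steps n (pvNames eu P) 0 = 0 := by
            rw [pvNames_of_not_mem _ _ he]; rfl
          rw [List.countP_append, List.countP_cons, List.countP_nil]
          have hgu : decide (i < pvGreedy steps n (pvNames eu (P ++ [(eu, en)])) 0)
              = false := by
            rw [pvNames_append_self, pvGreedy_append, if_neg hcc, hp0]
            simp
          have hrest : (PySem.List.dedup (P.map (·.1))).countP
              (fun u => decide (i < pvGreedy steps n (pvNames u (P ++ [(eu, en)])) 0)) =
              (PySem.List.dedup (P.map (·.1))).countP
              (fun u => decide (i < pvGreedy steps n (pvNames u P) 0)) := by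
            refine List.countP_congr (fun v hv => ?_)
            have hvne : v ≠ eu := by
              intro hx
              rw [PySem.List.dedup_eq_ofList] at hv
              exact he (hx ▸ (PySem.Set.mem_ofList _ _).mp hv)
            simp only [pvNames_append_ne _ _ _ _ hvne]
          rw [hrest, hgu]
          simp

lemma pvGroupA_eq (events : List String) :
    pvGroupA events =
      (events.map (fun e => (pvUid e, (pvTs e, pvNm e)))).foldl
        (fun d p => d.modify p.1 [] (· ++ [p.2])) PySem.Dict.empty := by
  unfold pvGroupA
  rw [List.foldl_map]
  exact congrArg (fun f => List.foldl f PySem.Dict.empty events)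
    (funext fun d => funext fun e => by simp only [pvUid, pvTs, pvNm, pvParts])

lemma pvParsedB_eq (events : List String) :
    pvParsedB events = events.map (fun e => (pvUid e, pvNm e)) := rfl

-- names of user u among the parsed events, from either side's parse
lemma pvGroupA_getD (events : List String) (u : Int) :
    ((pvGroupA events).getD u []).map (·.2) = pvNames u (pvParsedB events) := by
  rw [pvGroupA_eq, PySem.Dict.getD_foldl_modify_append, pvParsedB_eq]
  simp [pvNames, List.filter_map, List.map_map, Function.comp_def]

lemma pvGroupA_keys (events : List String) :
    (pvGroupA events).keys = PySem.Set.ofList ((pvParsedB events).map (·.1)) := by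
  rw [pvGroupA_eq, PySem.Dict.keys_foldl_modify_key, pvParsedB_eq]
  have hupd : ∀ (l : List Int), PySem.Set.update (PySem.Dict.empty : PySem.Dict Int (List (Int × String))).keys l =
      PySem.Set.ofList l := fun l => rfl
  rw [hupd]
  simp [List.map_map, Function.comp_def]

lemma pvGroupA_keys_nodup (events : List String) : (pvGroupA events).keys.Nodup := by
  rw [pvGroupA_eq]
  exact PySem.Dict.nodup_keys_foldl_modify_key _ _ _ _ _ (by simp)

-- per-funnel core: A's set size at step i equals B's counter at i
lemma pvCounts_eq (events : List String) (steps : List String) (i : Nat) :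
    PySem.Set.len
      (((pvGroupA events).items.foldl
          (fun sets p => pvSimA steps steps.length p.1 p.2 0 sets)
          (List.replicate steps.length PySem.Set.empty)).getD i PySem.Set.empty) =
    ((pvParsedB events).foldl (pvSweepB steps steps.length)
        (PySem.Dict.empty, List.replicate steps.length (0 : Int))).2.getD i 0 := by
  obtain ⟨-, ihb, ihc⟩ := pvSweep_inv steps steps.length (pvParsedB events)
  rw [ihc i,
    pvAfold_getD steps steps.length _ _ (List.length_replicate) i,
    pvGetD_replicate,
    pvFoldAddFilter (fun p => i < pvGreedy steps steps.length (p.2.map (·.2)) 0)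
      (pvGroupA events).items PySem.Set.empty (pvGroupA_keys_nodup events) (fun p _ => rfl)]
  have hlen : PySem.Set.len
      ((PySem.Set.empty : PySem.Set Int) ++ (((pvGroupA events).items.filter
        (fun p => decide (i < pvGreedy steps steps.length (p.2.map (·.2)) 0))).map (·.1))) =
      (((pvGroupA events).items.countP
        (fun p => decide (i < pvGreedy steps steps.length (p.2.map (·.2)) 0)) : Int)) := by
    show PySem.Set.len (([] : PySem.Set Int) ++ _) = _
    simp only [List.nil_append, PySem.Set.len, List.length_map, List.countP_eq_length_filter]
  rw [hlen,
    PySem.Dict.items_eq_map_keys (pvGroupA events) (pvGroupA_keys_nodup events) [],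
    List.countP_map, pvGroupA_keys, PySem.List.dedup_eq_ofList]
  refine congrArg _ (List.countP_congr (fun k _ => ?_))
  simp only [Function.comp_apply, pvGroupA_getD]

-- ===== VERDICT (by name: the statement is the Claim_ definition above) =====
theorem compute_funnel_counts_spec : Claim_equal_compute_funnel_counts := by
  intro funnels events _hdom _hpre
  unfold Spec_compute_funnel_counts
  have hdefs : pvFunnelDefsA funnels = pvFunnelDefsB funnels := by
    unfold pvFunnelDefsA pvFunnelDefsB
    rw [PySem.List.foldl_append_singleton_eq_map]
    simp
  simp only [compute_funnel_counts, compute_funnel_counts_alt, hdefs]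
  rw [PySem.List.foldl_append_singleton_eq_map, List.nil_append]
  refine List.map_congr_left (fun fd _ => ?_)
  rw [PySem.List.foldl_append_singleton_eq_map, List.singleton_append]
  refine congrArg _ (congrArg _ ?_)
  obtain ⟨-, ihb, -⟩ := pvSweep_inv fd.2 fd.2.length (pvParsedB events)
  apply List.ext_getElem
  · simp [PySem.List.length_enumerate, ihb]
  · intro k hk1 hk2
    simp only [List.getElem_map]
    rw [PySem.List.getElem_enumerate, List.getElem_zip]
    simp only [zero_add, PySem.List.pyGetD_natCast]
    rw [pvCounts_eq events fd.2 k, List.getD_eq_getElem _ 0 (by simp at hk2; omega)]
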